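-- pv_equiv track=rewrite | github.com/mrveiss/AutoBot-AI | autobot-backend/knowledge/search_components/tag_filter.py | combine_tag_fact_sets
-- ===== SOURCE A (Python) =====
-- from typing import Any, Dict, List, Optional, Set
--
-- def combine_tag_fact_sets(
--     tag_fact_sets: List[Set[str]], match_all: bool
-- ) -> Set[str]:
--     """Combine fact sets based on match_all flag. Issue #281: Extracted helper."""
--     if not tag_fact_sets:
--         return set()
--     if match_all:
--         result_ids = tag_fact_sets[0]
--         for fact_set in tag_fact_sets[1:]:
--             result_ids = result_ids.intersection(fact_set)
--     else:
--         result_ids = set()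
--         for fact_set in tag_fact_sets:
--             result_ids = result_ids.union(fact_set)
--     return result_ids
-- ===== SOURCE B (Python) =====
-- def combine_tag_fact_sets(tag_fact_sets, match_all):
--     """Single counting pass: tally how many sets contain each element,
--     then threshold (== len for intersection, >= 1 for union)."""
--     if not tag_fact_sets:
--         return set()
--     counts = {}
--     for fact_set in tag_fact_sets:
--         for e in fact_set:
--             counts[e] = counts.get(e, 0) + 1
--     if match_all:
--         need = len(tag_fact_sets)
--         return {e for e, c in counts.items() if c == need}
--     return set(counts)
-- ===== Notes on version B (the rewrite author's own statement) =====
-- stated objective: alternative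
-- what changed: Replaces the two branch-specific folds (repeated set.intersection / set.union) with one frequency-counting pass over all elements plus a threshold filter (count == len for match_all, any count for union).
import Mathlib
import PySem

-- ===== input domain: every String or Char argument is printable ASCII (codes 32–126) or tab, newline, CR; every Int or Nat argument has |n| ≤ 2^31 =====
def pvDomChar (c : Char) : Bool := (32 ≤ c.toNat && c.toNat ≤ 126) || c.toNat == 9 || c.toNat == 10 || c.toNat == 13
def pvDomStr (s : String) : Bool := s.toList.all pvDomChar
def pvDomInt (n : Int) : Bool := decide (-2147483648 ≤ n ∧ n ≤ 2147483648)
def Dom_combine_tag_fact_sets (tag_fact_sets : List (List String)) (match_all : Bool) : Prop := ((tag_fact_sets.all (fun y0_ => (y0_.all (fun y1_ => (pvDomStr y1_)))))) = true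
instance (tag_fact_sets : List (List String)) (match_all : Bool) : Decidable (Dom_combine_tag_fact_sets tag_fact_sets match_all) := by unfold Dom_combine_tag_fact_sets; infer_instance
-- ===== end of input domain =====

-- B replaces the two branch-specific set folds with one frequency-counting pass plus a
-- threshold filter; same asymptotic cost, different decomposition (objective: alternative).


-- ===== PORT A =====
def combine_tag_fact_sets (tag_fact_sets : List (List String)) (match_all : Bool) : List String :=
  match tag_fact_sets with
  | [] => PySem.Set.empty
  | h :: t =>
    if match_all then
      t.foldl (fun result_ids fact_set => PySem.Set.inter result_ids fact_set) h
    else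
      (h :: t).foldl (fun result_ids fact_set => PySem.Set.union result_ids fact_set) PySem.Set.empty

-- ===== PORT B =====
def combine_tag_fact_sets_alt (tag_fact_sets : List (List String)) (match_all : Bool) : List String :=
  match tag_fact_sets with
  | [] => PySem.Set.empty
  | h :: t =>
    let counts : PySem.Dict String Int :=
      (h :: t).foldl (fun d fact_set =>
        fact_set.foldl (fun d e => d.insert e (d.getD e 0 + 1)) d) PySem.Dict.empty
    if match_all then
      let need : Int := ((h :: t).length : Int)
      PySem.Set.ofList (((counts.items).filter (fun p => p.2 == need)).map Prod.fst)
    else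
      PySem.Set.ofList counts.keys

-- ===== PRECONDITION & SPEC =====
-- Pre_ is the set-representation invariant of the type convention (a Python set is a list of
-- DISTINCT elements): each inner list is duplicate-free. It excludes no genuine Python input.
def Pre_combine_tag_fact_sets (tag_fact_sets : List (List String)) (match_all : Bool) : Prop :=
  ∀ l ∈ tag_fact_sets, l.Nodup
instance (tag_fact_sets : List (List String)) (match_all : Bool) : Decidable (Pre_combine_tag_fact_sets tag_fact_sets match_all) := by unfold Pre_combine_tag_fact_sets; infer_instance
def pvWitness_combine_tag_fact_sets : List (List String) × Bool := ([["a"], ["a", "b"]], true)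
def Spec_combine_tag_fact_sets (tag_fact_sets : List (List String)) (match_all : Bool) (out : List String) : Prop := out = combine_tag_fact_sets_alt tag_fact_sets match_all
instance (tag_fact_sets : List (List String)) (match_all : Bool) (out : List String) : Decidable (Spec_combine_tag_fact_sets tag_fact_sets match_all out) := by unfold Spec_combine_tag_fact_sets; infer_instance

-- ===== CLAIM (what is proved, stated in full; the proofs are below) =====
def Claim_equal_combine_tag_fact_sets : Prop := ∀ (tag_fact_sets : List (List String)) (match_all : Bool), Dom_combine_tag_fact_sets tag_fact_sets match_all → Pre_combine_tag_fact_sets tag_fact_sets match_all → Spec_combine_tag_fact_sets tag_fact_sets match_all (combine_tag_fact_sets tag_fact_sets match_all)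

-- ===== LEMMAS AND PROOFS =====

-- A's union loop is one big Set.update over the concatenation.
theorem foldl_union_eq_update {α : Type} [BEq α] (ts : List (List α)) (s : PySem.Set α) :
    ts.foldl (fun r u => PySem.Set.union r u) s = PySem.Set.update s ts.flatten := by
  induction ts generalizing s with
  | nil => simp [PySem.Set.update]
  | cons u ts ih =>
      rw [List.foldl_cons, ih, List.flatten_cons, PySem.Set.update_append]
      rfl

-- A's intersection loop filters the accumulator by membership in every remaining set.
theorem foldl_inter_eq_filter {α : Type} [BEq α] (ts : List (List α)) (s : PySem.Set α) :
    ts.foldl (fun r u => PySem.Set.inter r u) s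
      = s.filter (fun x => ts.all (fun u => PySem.Set.contains u x)) := by
  induction ts generalizing s with
  | nil => simp
  | cons u ts ih =>
      rw [List.foldl_cons, ih]
      simp only [PySem.Set.inter, List.filter_filter, List.all_cons]
      apply List.filter_congr
      intro x _
      simp [Bool.and_comm]

-- B's nested counting loop is Counter of the concatenation.
theorem nested_foldl_eq_counter (ts : List (List String)) :
    ts.foldl (fun d fs => fs.foldl (fun d e => d.insert e (d.getD e 0 + 1)) d) PySem.Dict.empty
      = PySem.Dict.counter ts.flatten := by
  rw [← PySem.Dict.foldl_insert_getD_add_one_eq_counter, List.foldl_flatten]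

-- In a concatenation of duplicate-free lists, each element occurs at most once per list.
theorem count_flatten_le (x : String) (ts : List (List String))
    (h : ∀ l ∈ ts, l.Nodup) : ts.flatten.count x ≤ ts.length := by
  induction ts with
  | nil => simp
  | cons u ts ih =>
      have h1 : u.count x ≤ 1 := List.nodup_iff_count_le_one.mp (h u (by simp)) x
      have h2 := ih (fun l hl => h l (by simp [hl]))
      simp only [List.flatten_cons, List.count_append, List.length_cons]
      omega

theorem count_flatten_eq_iff (x : String) (ts : List (List String))
    (h : ∀ l ∈ ts, l.Nodup) : ts.flatten.count x = ts.length ↔ ∀ l ∈ ts, x ∈ l := by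
  induction ts with
  | nil => simp
  | cons u ts ih =>
      have h1 : u.count x ≤ 1 := List.nodup_iff_count_le_one.mp (h u (by simp)) x
      have h2 := count_flatten_le x ts (fun l hl => h l (by simp [hl]))
      have ih' := ih (fun l hl => h l (by simp [hl]))
      simp only [List.flatten_cons, List.count_append, List.length_cons, List.mem_cons]
      constructor
      · intro heq
        have hu : u.count x = 1 := by omega
        have hf : ts.flatten.count x = ts.length := by omega
        refine fun l hl => ?_
        rcases hl with rfl | hl
        · exact List.count_pos_iff.mp (by omega)
        · exact (ih'.mp hf) l hl
      · intro hall
        have hu : u.count x = 1 := by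
          have := List.count_pos_iff.mpr (hall u (Or.inl rfl))
          omega
        have hf : ts.flatten.count x = ts.length := ih'.mpr (fun l hl => hall l (Or.inr hl))
        omega

-- The intersection branch: A's filtered first set equals B's count-threshold filter.
theorem inter_case (h : List String) (t : List (List String))
    (hnd : ∀ l ∈ h :: t, l.Nodup) :
    List.filter (fun x => t.all fun u => PySem.Set.contains u x) h
      = PySem.Set.ofList (List.filter
          (fun k => ((List.count k ((h :: t).flatten) : Int) == (((h :: t).length : Nat) : Int)))
          (PySem.Set.ofList ((h :: t).flatten))) := by
  have hno : (List.filter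
      (fun k => ((List.count k ((h :: t).flatten) : Int) == (((h :: t).length : Nat) : Int)))
      (PySem.Set.ofList ((h :: t).flatten))).Nodup :=
    List.Nodup.filter _ (PySem.Set.nodup_ofList _)
  rw [PySem.Set.ofList_eq_self_of_nodup _ hno]
  have hofl : PySem.Set.ofList ((h :: t).flatten)
      = h ++ List.filter (fun y => !(PySem.Set.contains h y)) (PySem.Set.ofList t.flatten) := by
    rw [List.flatten_cons, PySem.Set.ofList_append,
      PySem.Set.ofList_eq_self_of_nodup _ (hnd h (by simp)),
      PySem.Set.update_eq_append_filter]
  rw [hofl, List.filter_append]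
  have hndt : ∀ l ∈ t, l.Nodup := fun l hl => hnd l (by simp [hl])
  have hright : List.filter
      (fun k => ((List.count k ((h :: t).flatten) : Int) == (((h :: t).length : Nat) : Int)))
      (List.filter (fun y => !(PySem.Set.contains h y)) (PySem.Set.ofList t.flatten)) = [] := by
    rw [List.filter_eq_nil_iff]
    intro x hx
    have hxh : x ∉ h := by
      have := (List.mem_filter.mp hx).2
      simpa [PySem.Set.contains_iff] using this
    have hch : h.count x = 0 := List.count_eq_zero.mpr hxh
    have hle := count_flatten_le x t hndt
    simp only [List.flatten_cons, List.count_append, List.length_cons, beq_iff_eq,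
      Int.natCast_inj]
    omega
  rw [hright, List.append_nil]
  apply List.filter_congr
  intro x hx
  have hch : h.count x = 1 := List.count_eq_one_of_mem (hnd h (by simp)) hx
  have hle := count_flatten_le x t (fun l hl => hnd l (by simp [hl]))
  have hiff := count_flatten_eq_iff x t (fun l hl => hnd l (by simp [hl]))
  rw [Bool.eq_iff_iff]
  simp only [List.all_eq_true, PySem.Set.contains_iff, List.flatten_cons, List.count_append,
    List.length_cons, beq_iff_eq, Int.natCast_inj]
  constructor
  · intro hall
    have := hiff.mpr hall
    omega
  · intro heq
    exact hiff.mp (by omega)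

-- ===== VERDICT (by name: the statement is the Claim_ definition above) =====
theorem combine_tag_fact_sets_spec : Claim_equal_combine_tag_fact_sets := by
  unfold Claim_equal_combine_tag_fact_sets Spec_combine_tag_fact_sets
  intro tfs match_all _ hpre
  unfold combine_tag_fact_sets combine_tag_fact_sets_alt
  match tfs with
  | [] => rfl
  | h :: t =>
    simp only [nested_foldl_eq_counter]
    cases match_all with
    | false =>
        simp only [Bool.false_eq_true, if_false, foldl_union_eq_update,
          PySem.Dict.keys_counter]
        rw [PySem.Set.update_empty, PySem.Set.ofList_ofList]
    | true =>
        simp only [if_true, foldl_inter_eq_filter, PySem.Dict.items_counter,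
          List.filter_map, List.map_map]
        rw [show (Prod.fst ∘ fun k : String => (k, ((List.count k ((h :: t).flatten) : Int)))) = id
          from funext fun k => rfl, List.map_id]
        exact inter_case h t hpre
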